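-- pv_equiv track=rewrite | github.com/Centaurus-X/fluux_control_runtime | product/src/core/worker_datastore.py | _detect_record_pk_key
-- ===== SOURCE A (Python) =====
-- def _looks_like_record_id_key(key):
--     if not isinstance(key, str):
--         return False
--
--     text = key.strip().lower()
--     if not text:
--         return False
--
--     return text == "id" or text.endswith("_id")
--
-- def _normalize_record_id_value(value):
--     if value is None or isinstance(value, bool):
--         return None
--
--     if isinstance(value, int):
--         return value
--
--     if isinstance(value, str):
--         text = value.strip()
--         if text:
--             return text
--
--     return None
--
-- def _detect_record_pk_key(records):
--     if not isinstance(records, list) or not records: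
--         return None
--
--     first_record = None
--     for item in records:
--         if isinstance(item, dict) and item:
--             first_record = item
--             break
--
--     if first_record is None:
--         return None
--
--     for key in first_record.keys():
--         if not _looks_like_record_id_key(key):
--             continue
--
--         valid = True
--         for record in records:
--             if not isinstance(record, dict):
--                 valid = False
--                 break
--             if key not in record:
--                 valid = False
--                 break
--             if _normalize_record_id_value(record.get(key)) is None:
--                 valid = False
--                 break
--
--         if valid:
--             return key
--
--     return None
-- ===== SOURCE B (Python) =====
-- def _looks_like_record_id_key(key):
--     if not isinstance(key, str):
--         return False
--     text = key.strip().lower()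
--     if not text:
--         return False
--     return text == "id" or text.endswith("_id")
--
--
-- def _normalize_record_id_value(value):
--     if value is None or isinstance(value, bool):
--         return None
--     if isinstance(value, int):
--         return value
--     if isinstance(value, str):
--         text = value.strip()
--         if text:
--             return text
--     return None
--
--
-- def _detect_record_pk_key(records):
--     if not isinstance(records, list):
--         return None
--     first = None
--     for item in records:
--         if isinstance(item, dict) and item:
--             first = item
--             break
--     if first is None:
--         return None
--     # ordered list of candidate keys, shrunk by one single pass over the records
--     survivors = [k for k in first if _looks_like_record_id_key(k)]
--     for record in records:
--         if not survivors:
--             break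
--         if not isinstance(record, dict):
--             return None
--         survivors = [k for k in survivors
--                      if _normalize_record_id_value(record.get(k)) is not None]
--     return survivors[0] if survivors else None
-- ===== Notes on version B (the rewrite author's own statement) =====
-- stated objective: alternative
-- what changed: Transposes the loops: instead of rescanning all records for each candidate key, B builds the ordered candidate list once and shrinks it in a single pass over the records (with an early stop when it empties), returning its head.
import Mathlib
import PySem

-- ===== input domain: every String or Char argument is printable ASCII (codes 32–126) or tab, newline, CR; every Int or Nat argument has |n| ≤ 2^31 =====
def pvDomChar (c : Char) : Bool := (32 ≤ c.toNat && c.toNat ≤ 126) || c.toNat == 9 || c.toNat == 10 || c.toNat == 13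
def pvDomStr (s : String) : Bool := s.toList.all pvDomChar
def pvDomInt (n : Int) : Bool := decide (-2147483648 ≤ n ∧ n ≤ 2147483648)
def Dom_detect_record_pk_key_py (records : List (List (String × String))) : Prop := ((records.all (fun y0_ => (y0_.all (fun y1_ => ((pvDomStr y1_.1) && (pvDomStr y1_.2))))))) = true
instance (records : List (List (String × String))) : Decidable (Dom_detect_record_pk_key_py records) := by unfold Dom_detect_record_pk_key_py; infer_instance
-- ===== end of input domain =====

-- B replaces A's per-key rescan of all records by one pass over the records that shrinks an
-- ordered candidate list and returns its head (alternative decomposition; same cost).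

-- shared module helpers (_looks_like_record_id_key / _normalize_record_id_value)
def looksLikeRecordIdKey (key : String) : Bool :=
  let text := PySem.Str.lower (PySem.Str.strip key)
  !(text == "") && (text == "id" || PySem.Str.endswith text "_id")

-- values are strings here, so _normalize_record_id_value returns the stripped text if nonempty
def normalizeRecordIdValue (value : String) : Option String :=
  let text := PySem.Str.strip value
  if text == "" then none else some text

-- ===== PORT A =====
def recContains (r : List (String × String)) (k : String) : Bool := r.any (fun p => p.1 == k)

def recGet? (r : List (String × String)) (k : String) : Option String :=
  (r.find? (fun p => p.1 == k)).map (·.2)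

-- dict keys in insertion order
def recKeys (r : List (String × String)) : List String := PySem.List.dedup (r.map (·.1))

-- 'key in record and _normalize_record_id_value(record.get(key)) is not None'
def recValidFor (record : List (String × String)) (key : String) : Bool :=
  recContains record key &&
    (match recGet? record key with
     | some v => (normalizeRecordIdValue v).isSome
     | none => false)

def detect_record_pk_key_py (records : List (List (String × String))) : Option String :=
  if records.isEmpty then none
  else
    match records.find? (fun item => !item.isEmpty) with
    | none => none
    | some first_record =>
      (recKeys first_record).find? (fun key =>
        looksLikeRecordIdKey key &&
        records.all (fun record => recValidFor record key))

-- ===== PORT B =====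
-- 'next dict record that is non-empty', as B's explicit first loop
def bFirstNonEmpty : List (List (String × String)) → Option (List (String × String))
  | [] => none
  | r :: rs => if r.isEmpty then bFirstNonEmpty rs else some r

-- record.get(k): first-match lookup on the assoc list, recursively
def bLookup : List (String × String) → String → Option String
  | [], _ => none
  | (k', v) :: rest, k => if k' == k then some v else bLookup rest k

-- '_normalize_record_id_value(record.get(k)) is not None'
def bKeeps (record : List (String × String)) (k : String) : Bool :=
  ((bLookup record k).bind normalizeRecordIdValue).isSome

-- the single pass: shrink the ordered survivor list record by record, stop when empty
def bShrink : List (List (String × String)) → List String → List String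
  | [], surv => surv
  | r :: rs, surv =>
    if surv.isEmpty then surv
    else bShrink rs (surv.filter (fun k => bKeeps r k))

def detect_record_pk_key_py_alt (records : List (List (String × String))) : Option String :=
  match bFirstNonEmpty records with
  | none => none
  | some first =>
    let survivors := (PySem.List.dedup (first.map Prod.fst)).filter looksLikeRecordIdKey
    (bShrink records survivors).head?

-- ===== PRECONDITION & SPEC =====
def Spec_detect_record_pk_key_py (records : List (List (String × String))) (out : Option String) : Prop := out = detect_record_pk_key_py_alt records
instance (records : List (List (String × String))) (out : Option String) : Decidable (Spec_detect_record_pk_key_py records out) := by unfold Spec_detect_record_pk_key_py; infer_instance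

-- ===== CLAIM (what is proved, stated in full; the proofs are below) =====
def Claim_equal_detect_record_pk_key_py : Prop := ∀ (records : List (List (String × String))), Dom_detect_record_pk_key_py records → Spec_detect_record_pk_key_py records (detect_record_pk_key_py records)

-- ===== LEMMAS AND PROOFS =====

theorem bFirstNonEmpty_eq_find? (rs : List (List (String × String))) :
    bFirstNonEmpty rs = rs.find? (fun r => !r.isEmpty) := by
  induction rs with
  | nil => rfl
  | cons r rs ih =>
    simp only [bFirstNonEmpty, List.find?_cons]
    cases h : r.isEmpty <;> simp [ih]

theorem bLookup_eq_recGet? (r : List (String × String)) (k : String) :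
    bLookup r k = recGet? r k := by
  induction r with
  | nil => rfl
  | cons p rest ih =>
    obtain ⟨k', v⟩ := p
    simp only [bLookup, recGet?, List.find?_cons]
    by_cases h : (k' == k) <;> simp [h, ih, recGet?]

theorem bKeeps_eq_recValidFor (r : List (String × String)) (k : String) :
    bKeeps r k = recValidFor r k := by
  unfold bKeeps recValidFor recContains
  rw [bLookup_eq_recGet?]
  cases hf : r.find? (fun p => p.1 == k) with
  | none =>
    have hany : r.any (fun p => p.1 == k) = false := by
      rw [List.any_eq_false]
      intro x hx
      simpa using List.find?_eq_none.mp hf x hx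
    simp [recGet?, hf, hany]
  | some q =>
    have hany : r.any (fun p => p.1 == k) = true :=
      List.any_eq_true.mpr ⟨q, List.mem_of_find?_eq_some hf,
        List.find?_some (p := fun (p : String × String) => p.1 == k) hf⟩
    simp [recGet?, hf, hany]

-- invariant of B's single pass: it filters the survivor list by validity on every record
theorem bShrink_eq_filter (rs : List (List (String × String))) (surv : List String) :
    bShrink rs surv = surv.filter (fun k => rs.all (fun r => bKeeps r k)) := by
  induction rs generalizing surv with
  | nil => simp [bShrink]
  | cons r rs ih =>
    simp only [bShrink]
    by_cases h : surv.isEmpty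
    · rw [List.isEmpty_iff] at h
      simp [h]
    · simp only [h]
      rw [ih, List.filter_filter]
      simp [Bool.and_comm]

theorem head?_filter_eq_find? {α : Type} (l : List α) (p : α → Bool) :
    (l.filter p).head? = l.find? p := by
  induction l with
  | nil => rfl
  | cons x l ih =>
    simp only [List.filter_cons, List.find?_cons]
    cases p x <;> simp [ih]

theorem find?_congr_mem {α : Type} (l : List α) (p q : α → Bool)
    (h : ∀ x ∈ l, p x = q x) : l.find? p = l.find? q := by
  induction l with
  | nil => rfl
  | cons x l ih =>
    simp only [List.find?_cons, h x (List.mem_cons_self)]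
    cases q x <;> simp [ih (fun y hy => h y (List.mem_cons_of_mem _ hy))]

-- ===== VERDICT (by name: the statement is the Claim_ definition above) =====
theorem detect_record_pk_key_py_spec : Claim_equal_detect_record_pk_key_py := by
  intro records _
  unfold Spec_detect_record_pk_key_py detect_record_pk_key_py detect_record_pk_key_py_alt
  rw [bFirstNonEmpty_eq_find?]
  by_cases hemp : records.isEmpty
  · rw [List.isEmpty_iff] at hemp
    simp [hemp]
  · simp only [hemp, if_neg, Bool.false_eq_true, not_false_iff]
    cases hfind : records.find? (fun r => !r.isEmpty) with
    | none => rfl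
    | some fr =>
      simp only []
      rw [bShrink_eq_filter, List.filter_filter, head?_filter_eq_find?]
      apply find?_congr_mem
      intro k _
      simp [bKeeps_eq_recValidFor, Bool.and_comm]
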